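-- pv_equiv track=rewrite | github.com/isaacbs/final5481 | src/p3.py | create_kmers
-- ===== SOURCE A (Python) =====
-- def create_kmers(sequences, k):
--     # Create a dictionary to hold the kmers generated
--     kmers = {}
--
--     # Iterate through the list of sequences
--     for sequence in sequences:
--
--         # Create kmers from sequence
--         for i in range(len(sequence)):
--             kmer = sequence[i:i+k]
--
--             #Check to see if we need to loop around to the front of the sequence
--             if len(kmer) != k:
--                 kmer += sequence[:(k-len(kmer))]
--             if kmer in kmers:
--                 kmers[kmer] += 1
--             else:
--                 kmers[kmer] = 1
--
--     # Return the list of kmers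
--     return kmers
-- ===== SOURCE B (Python) =====
-- def create_kmers(sequences, k):
--     # Staged sort-then-scan: materialise the circular k-mer stream (doubled-string slices),
--     # sort it and compute each distinct k-mer's count by run-length scanning the sorted list,
--     # then emit distinct k-mers in first-occurrence order with their counts.
--     stream = [(s + s)[i:i + k] for s in sequences for i in range(len(s))]
--     srt = sorted(stream)
--     counts = {}
--     i = 0
--     while i < len(srt):
--         j = i
--         while j < len(srt) and srt[j] == srt[i]:
--             j += 1
--         counts[srt[i]] = j - i
--         i = j
--     return {km: counts[km] for km in dict.fromkeys(stream)}
-- ===== Notes on version B (the rewrite author's own statement) =====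
-- stated objective: alternative
-- what changed: B replaces A's single pass that mutates a counting dict per position (wraparound re-slice branch plus membership branch) by a staged sort-then-scan pipeline: materialise the whole circular k-mer stream as uniform slices of doubled strings, sort it, compute each distinct k-mer's count by run-length scanning the sorted list, and finally emit distinct k-mers in first-occurrence order with their counts; it trades hash counting for sorting.
-- outside the precondition, e.g. on create_kmers(['ABC'], -1): A returns {'AB': 3}, B returns {'ABCAB': 1, '': 2}
import Mathlib
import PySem

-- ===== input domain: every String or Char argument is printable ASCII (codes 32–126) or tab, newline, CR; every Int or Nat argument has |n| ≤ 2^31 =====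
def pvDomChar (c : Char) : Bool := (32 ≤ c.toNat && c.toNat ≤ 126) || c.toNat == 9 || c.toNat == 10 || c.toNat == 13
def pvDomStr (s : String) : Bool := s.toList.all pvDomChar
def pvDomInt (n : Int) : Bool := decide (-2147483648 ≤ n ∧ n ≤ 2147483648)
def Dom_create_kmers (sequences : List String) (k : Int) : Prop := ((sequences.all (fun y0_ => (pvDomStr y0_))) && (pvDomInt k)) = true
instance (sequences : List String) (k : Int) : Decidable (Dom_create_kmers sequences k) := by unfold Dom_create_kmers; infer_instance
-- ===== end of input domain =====

-- B stages the work: materialise the circular k-mer stream as doubled-string slices, sort it,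
-- compute each distinct k-mer's count by run-length scanning the sorted list, and emit distinct
-- k-mers in first-occurrence order (objective: alternative, sort-then-scan instead of dict counting).

-- ===== PORT A =====
def create_kmers (sequences : List String) (k : Int) : List (String × Int) :=
  (sequences.foldl (fun d s =>
      (PySem.List.pyRange 0 (PySem.Str.len s) 1).foldl (fun d i =>
        let kmer0 := PySem.List.slice s.toList (some i) (some (i + k))
        let kmer := if (kmer0.length : Int) ≠ k
          then kmer0 ++ PySem.List.slice s.toList none (some (k - (kmer0.length : Int)))
          else kmer0
        if d.contains kmer then d.insert kmer (d.getD kmer 0 + 1) else d.insert kmer 1)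
      d)
    PySem.Dict.empty).items.map (fun p => (String.ofList p.1, p.2))

-- ===== PORT B =====
-- Source B's while loop over the sorted list: consume the run of the head element, record its length.
def pvRunCounts : List (List Char) → PySem.Dict (List Char) Int → PySem.Dict (List Char) Int
  | [], counts => counts
  | x :: rest, counts =>
      pvRunCounts (rest.dropWhile (· == x))
        (counts.insert x (1 + ((rest.takeWhile (· == x)).length : Int)))
termination_by ys _ => ys.length
decreasing_by
  simpa using Nat.lt_succ_of_le (List.length_dropWhile_le _ _)

def create_kmers_alt (sequences : List String) (k : Int) : List (String × Int) :=
  let stream := sequences.flatMap (fun s =>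
    (PySem.List.pyRange 0 (PySem.Str.len s) 1).map (fun i =>
      PySem.List.slice (s.toList ++ s.toList) (some i) (some (i + k))))
  let counts := pvRunCounts (PySem.List.sorted stream (fun x => x)) PySem.Dict.empty
  (PySem.List.dedup stream).map (fun km => (String.ofList km, counts.getD km 0))

-- ===== PRECONDITION & SPEC =====
-- Pre_ excludes negative k, on which A still returns: there A's wraparound padding produces
-- accidental slices (kmers of the wrong length with inflated counts), an artefact B does not reproduce.
def Pre_create_kmers (sequences : List String) (k : Int) : Prop := 0 ≤ k
instance (sequences : List String) (k : Int) : Decidable (Pre_create_kmers sequences k) := by unfold Pre_create_kmers; infer_instance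
def pvWitness_create_kmers : List String × Int := (["ACG", "T"], 2)

def Spec_create_kmers (sequences : List String) (k : Int) (out : List (String × Int)) : Prop := out = create_kmers_alt sequences k
instance (sequences : List String) (k : Int) (out : List (String × Int)) : Decidable (Spec_create_kmers sequences k out) := by unfold Spec_create_kmers; infer_instance

-- ===== CLAIM (what is proved, stated in full; the proofs are below) =====
def Claim_equal_create_kmers : Prop := ∀ (sequences : List String) (k : Int), Dom_create_kmers sequences k → Pre_create_kmers sequences k → Spec_create_kmers sequences k (create_kmers sequences k)

-- ===== LEMMAS AND PROOFS =====

-- A's membership-branch update is the unconditional counting insert.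
theorem pv_step_eq (d : PySem.Dict (List Char) Int) (km : List Char) :
    (if d.contains km then d.insert km (d.getD km 0 + 1) else d.insert km 1)
      = d.insert km (d.getD km 0 + 1) := by
  by_cases h : d.contains km = true
  · simp [h]
  · simp only [Bool.not_eq_true] at h
    simp [h, PySem.Dict.getD_of_not_contains]

-- A's wraparound-patched slice is the slice of the doubled string (0 ≤ k, index in range).
theorem pv_kmer_eq (cs : List Char) (i' k' : Nat) (hin : i' < cs.length) :
    (if (((cs.drop i').take k').length : Int) ≠ (k' : Int)
      then (cs.drop i').take k'
            ++ PySem.List.slice cs none (some ((k' : Int) - ((((cs.drop i').take k').length : Nat) : Int)))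
      else (cs.drop i').take k')
    = ((cs ++ cs).drop i').take k' := by
  have hlen : ((cs.drop i').take k').length = min k' (cs.length - i') := by
    simp [List.length_take, List.length_drop]
  rw [List.drop_append]
  have hz : i' - cs.length = 0 := by omega
  rw [hz, List.drop_zero, List.take_append]
  by_cases h : ((cs.drop i').take k').length = k'
  · rw [if_neg (by simp [h])]
    have h2 : k' - (cs.length - i') = 0 := by omega
    simp [List.length_drop, h2]
  · have hcast : (((cs.drop i').take k').length : Int) ≠ (k' : Int) := by
      exact_mod_cast h
    have heq : (k' : Int) - ((((cs.drop i').take k').length : Nat) : Int)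
        = ((k' - ((cs.drop i').take k').length : Nat) : Int) := by
      omega
    rw [if_pos hcast, heq, PySem.List.slice_to_natCast]
    have h3 : k' - ((cs.drop i').take k').length = k' - (cs.drop i').length := by
      simp only [List.length_drop] at *; omega
    rw [h3]

-- A's inner loop over one sequence, rewritten to a counting-insert fold of doubled-string slices
theorem pv_inner_eq (s : String) (k : Int) (hk : 0 ≤ k) (d : PySem.Dict (List Char) Int) :
    (PySem.List.pyRange 0 (PySem.Str.len s) 1).foldl (fun d i =>
        let kmer0 := PySem.List.slice s.toList (some i) (some (i + k))
        let kmer := if (kmer0.length : Int) ≠ k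
          then kmer0 ++ PySem.List.slice s.toList none (some (k - (kmer0.length : Int)))
          else kmer0
        if d.contains kmer then d.insert kmer (d.getD kmer 0 + 1) else d.insert kmer 1) d
    = ((PySem.List.pyRange 0 (PySem.Str.len s) 1).map (fun i =>
        PySem.List.slice (s.toList ++ s.toList) (some i) (some (i + k)))).foldl
        (fun d km => d.insert km (d.getD km 0 + 1)) d := by
  rw [List.foldl_map]
  apply PySem.List.foldl_congr_mem
  intro d i hi
  rw [PySem.Str.len_eq, PySem.List.mem_pyRange_one] at hi
  obtain ⟨hi0, hilt⟩ := hi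
  obtain ⟨i', rfl⟩ : ∃ n : Nat, i = (n : Int) := ⟨i.toNat, (Int.toNat_of_nonneg hi0).symm⟩
  obtain ⟨k', rfl⟩ : ∃ n : Nat, k = (n : Int) := ⟨k.toNat, (Int.toNat_of_nonneg hk).symm⟩
  have hin : i' < s.toList.length := by exact_mod_cast hilt
  simp only [PySem.List.slice_natCast_add]
  rw [pv_step_eq, pv_kmer_eq s.toList i' k' hin]

-- the head element of a sorted list does not reappear after its run is dropped
theorem pv_not_mem_dropWhile (x : List Char) (rest : List (List Char))
    (hp : (x :: rest).Pairwise (· ≤ ·)) : x ∉ rest.dropWhile (· == x) := by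
  intro hmem
  rcases List.pairwise_cons.mp hp with ⟨hx, hrest⟩
  cases hdw : rest.dropWhile (· == x) with
  | nil => rw [hdw] at hmem; exact absurd hmem (List.not_mem_nil)
  | cons y t =>
    have hne : rest.dropWhile (· == x) ≠ [] := by simp [hdw]
    have hy0 := List.head_dropWhile_not (· == x) hne
    simp only [hdw, List.head_cons, beq_eq_false_iff_ne] at hy0
    have hxy : x ≤ y := hx y ((List.dropWhile_sublist (· == x)).subset
      (by rw [hdw]; exact List.mem_cons_self))
    have hlt : x < y := lt_of_le_of_ne hxy (Ne.symm hy0)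
    rw [hdw] at hmem
    rcases List.mem_cons.mp hmem with rfl | hxt
    · exact hy0 rfl
    · have hpdw : (y :: t).Pairwise (· ≤ ·) := by
        have := hrest.sublist (List.dropWhile_sublist (p := (· == x)))
        rwa [hdw] at this
      have hyle : y ≤ x := (List.pairwise_cons.mp hpdw).1 x hxt
      exact absurd (lt_of_lt_of_le hlt hyle) (lt_irrefl x)

-- run-length scanning a sorted list yields the count of every element present in it
theorem pv_runCounts_getD (ys : List (List Char)) (d : PySem.Dict (List Char) Int)
    (hp : ys.Pairwise (· ≤ ·)) (v : List Char) :
    (pvRunCounts ys d).getD v 0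
      = if v ∈ ys then (ys.count v : Int) else d.getD v 0 := by
  fun_induction pvRunCounts ys d with
  | case1 d => simp
  | case2 x rest d ih =>
    have hrest : rest.Pairwise (· ≤ ·) := (List.pairwise_cons.mp hp).2
    have hp' : (rest.dropWhile (· == x)).Pairwise (· ≤ ·) :=
      hrest.sublist (List.dropWhile_sublist _)
    rw [ih hp']
    have hxnot : x ∉ rest.dropWhile (· == x) := pv_not_mem_dropWhile x rest hp
    have hsplit : rest = rest.takeWhile (· == x) ++ rest.dropWhile (· == x) :=
      (List.takeWhile_append_dropWhile).symm
    have hruncnt : ∀ w, w ∈ rest.takeWhile (· == x) → w = x := by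
      intro w hw
      have := List.mem_takeWhile_imp hw
      simpa using this
    by_cases hv : v = x
    · subst hv
      have hcx : rest.count v = (rest.takeWhile (· == v)).length := by
        conv_lhs => rw [hsplit]
        rw [List.count_append, List.count_eq_zero.mpr hxnot,
            List.count_eq_length.mpr (fun w hw => (hruncnt w hw).symm)]
        omega
      rw [if_neg hxnot, if_pos List.mem_cons_self, PySem.Dict.getD_insert, if_pos rfl,
          List.count_cons_self, hcx]
      push_cast
      ring
    · have hvrun : v ∉ rest.takeWhile (· == x) := fun h => hv (hruncnt v h)
      have hmemiff : v ∈ rest.dropWhile (· == x) ↔ v ∈ x :: rest := by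
        constructor
        · intro h
          exact List.mem_cons_of_mem _ (by rw [hsplit]; exact List.mem_append_right _ h)
        · intro h
          rcases List.mem_cons.mp h with rfl | h'
          · exact absurd rfl hv
          · rw [hsplit] at h'
            rcases List.mem_append.mp h' with h'' | h''
            · exact absurd (hruncnt v h'') hv
            · exact h''
      have hcnt : (rest.dropWhile (· == x)).count v = (x :: rest).count v := by
        rw [List.count_cons_of_ne (Ne.symm hv)]
        conv_rhs => rw [hsplit]
        rw [List.count_append, List.count_eq_zero.mpr hvrun]
        omega
      have hgd : (d.insert x (1 + ((rest.takeWhile (· == x)).length : Int))).getD v 0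
          = d.getD v 0 := by
        rw [PySem.Dict.getD_insert, if_neg hv]
      by_cases hmem : v ∈ rest.dropWhile (· == x)
      · rw [if_pos hmem, if_pos (hmemiff.mp hmem), hcnt]
      · rw [if_neg hmem, if_neg (fun h => hmem (hmemiff.mpr h)), hgd]

-- the counts dict looks up the stream count of every k-mer of the stream
theorem pv_counts_eq (stream : List (List Char)) (km : List Char) (hkm : km ∈ stream) :
    (pvRunCounts (PySem.List.sorted stream (fun x => x)) PySem.Dict.empty).getD km 0
      = (stream.count km : Int) := by
  have hsp : (PySem.List.sorted stream (fun x : List Char => x)).Pairwise (· ≤ ·) := by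
    have h := PySem.List.sorted_pairwise (κ := List Char) stream (fun x => x)
    convert h using 2
  rw [pv_runCounts_getD _ _ hsp km,
      if_pos (by rw [PySem.List.mem_sorted]; exact hkm)]
  rw [(PySem.List.sorted_perm stream (fun x => x) false).count_eq]

-- ===== VERDICT (by name: the statement is the Claim_ definition above) =====
theorem create_kmers_spec : Claim_equal_create_kmers := by
  intro sequences k _ hpre
  unfold Spec_create_kmers create_kmers create_kmers_alt
  have h1 : (sequences.foldl (fun d s =>
      (PySem.List.pyRange 0 (PySem.Str.len s) 1).foldl (fun d i =>
        let kmer0 := PySem.List.slice s.toList (some i) (some (i + k))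
        let kmer := if (kmer0.length : Int) ≠ k
          then kmer0 ++ PySem.List.slice s.toList none (some (k - (kmer0.length : Int)))
          else kmer0
        if d.contains kmer then d.insert kmer (d.getD kmer 0 + 1) else d.insert kmer 1)
      d) PySem.Dict.empty)
      = PySem.Dict.counter (sequences.flatMap (fun s =>
          (PySem.List.pyRange 0 (PySem.Str.len s) 1).map (fun i =>
            PySem.List.slice (s.toList ++ s.toList) (some i) (some (i + k))))) := by
    rw [← PySem.Dict.foldl_insert_getD_add_one_eq_counter, List.foldl_flatMap]
    apply PySem.List.foldl_congr_mem
    intro d s _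
    exact pv_inner_eq s k hpre d
  rw [h1, PySem.Dict.items_counter]
  simp only [List.map_map, ← PySem.List.dedup_eq_ofList]
  apply List.map_congr_left
  intro km hkm
  simp only [Function.comp_apply]
  rw [pv_counts_eq _ km ((PySem.List.mem_dedup _ km).mp hkm)]
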